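-- pv_equiv track=rewrite | github.com/7rah/crypto-lab | ui_client.py | render_block_status
-- ===== SOURCE A (Python) =====
-- def render_block_status(uploaded_blocks, block_count):
--     # 控制每行显示的块数量
--     LINE_DISPLAY_COUNT = 50
--     uploaded_blocks = set(uploaded_blocks)
--
--     # 计算块的相对位置，比如 uploaded_blocks = {1,2,3,5,6,10}，block_count = 15
--     # 那么 block_status = [1,1,1,0,1,1,0,0,0,0,1,0,0,0,0]
--
--     res = ""
--     for i in range(block_count):
--         if i in uploaded_blocks:
--             res += "■"
--         else:
--             res += "□"
--
--     # 每 LINE_DISPLAY_COUNT 个块换行，最终结果还是字符串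
--     res = [res[i:i+LINE_DISPLAY_COUNT] for i in range(0, len(res), LINE_DISPLAY_COUNT)]
--     res = "\n".join(res)
--     return res
-- ===== SOURCE B (Python) =====
-- def render_block_status(uploaded_blocks, block_count):
--     # one pass: emit the newline between lines inline instead of slicing afterwards
--     uploaded = set(uploaded_blocks)
--     res = ""
--     for i in range(block_count):
--         if i > 0 and i % 50 == 0:
--             res += "\n"
--         res += "■" if i in uploaded else "□"
--     return res
-- ===== Notes on version B (the rewrite author's own statement) =====
-- stated objective: simpler
-- what changed: B emits the '\n' separators inline during the single pass over range(block_count), removing A's entire second phase that slices the finished string into 50-char chunks and '\n'.join's them.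
import Mathlib
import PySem

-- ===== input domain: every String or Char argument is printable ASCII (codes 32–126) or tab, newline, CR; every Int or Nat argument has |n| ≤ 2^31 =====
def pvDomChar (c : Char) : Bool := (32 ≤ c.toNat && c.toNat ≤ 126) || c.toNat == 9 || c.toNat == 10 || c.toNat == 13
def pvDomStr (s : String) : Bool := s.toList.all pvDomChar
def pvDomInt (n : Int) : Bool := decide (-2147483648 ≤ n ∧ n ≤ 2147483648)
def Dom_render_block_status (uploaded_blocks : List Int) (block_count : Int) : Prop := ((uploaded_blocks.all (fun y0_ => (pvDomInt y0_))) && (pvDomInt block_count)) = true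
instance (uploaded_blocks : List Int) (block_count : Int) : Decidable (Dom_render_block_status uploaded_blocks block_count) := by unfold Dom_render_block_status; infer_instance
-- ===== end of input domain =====

-- B renders the same grid in one pass, emitting the '\n' separators inline instead of
-- slicing the finished string into 50-char chunks afterwards (objective: simpler).


-- ===== PORT A =====
def render_block_status (uploaded_blocks : List Int) (block_count : Int) : String :=
  let up : PySem.Set Int := PySem.Set.ofList uploaded_blocks
  -- res = ""; for i in range(block_count): res += "■"/"□"
  let res : List Char := (PySem.List.pyRange 0 block_count 1).foldl
    (fun acc i => acc ++ (if PySem.Set.contains up i then ['■'] else ['□'])) []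
  -- res = [res[i:i+50] for i in range(0, len(res), 50)]; res = "\n".join(res)
  let chunks : List (List Char) := (PySem.List.pyRange 0 (PySem.List.len res) 50).map
    (fun i => PySem.List.slice res (some i) (some (i + 50)))
  String.ofList (PySem.Chars.join ['\n'] chunks)

-- ===== PORT B =====
def render_block_status_alt (uploaded_blocks : List Int) (block_count : Int) : String :=
  let uploaded : PySem.Set Int := PySem.Set.ofList uploaded_blocks
  -- res = ""; for i in range(block_count): if i>0 and i%50==0: res += "\n"; res += "■"/"□"
  let res : List Char := (PySem.List.pyRange 0 block_count 1).foldl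
    (fun acc i => acc ++ ((if 0 < i ∧ PySem.Int.mod i 50 = 0 then ['\n'] else [])
      ++ (if PySem.Set.contains uploaded i then ['■'] else ['□']))) []
  String.ofList res

-- ===== PRECONDITION & SPEC =====
def Spec_render_block_status (uploaded_blocks : List Int) (block_count : Int) (out : String) : Prop := out = render_block_status_alt uploaded_blocks block_count
instance (uploaded_blocks : List Int) (block_count : Int) (out : String) : Decidable (Spec_render_block_status uploaded_blocks block_count out) := by unfold Spec_render_block_status; infer_instance

-- ===== CLAIM (what is proved, stated in full; the proofs are below) =====
def Claim_equal_render_block_status : Prop := ∀ (uploaded_blocks : List Int) (block_count : Int), Dom_render_block_status uploaded_blocks block_count → Spec_render_block_status uploaded_blocks block_count (render_block_status uploaded_blocks block_count)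

-- ===== LEMMAS AND PROOFS =====

theorem pv_join_snoc (sep : List Char) (l : List (List Char)) (p : List Char) (h : l ≠ []) :
    PySem.Chars.join sep (l ++ [p]) = PySem.Chars.join sep l ++ sep ++ p := by
  induction l with
  | nil => simp at h
  | cons q rest ih =>
    cases rest with
    | nil => simp [PySem.Chars.join_cons_cons, PySem.Chars.join_singleton]
    | cons r t =>
      have h1 : (q :: r :: t) ++ [p] = q :: r :: (t ++ [p]) := by simp
      rw [h1, PySem.Chars.join_cons_cons]
      have h2 : r :: (t ++ [p]) = (r :: t) ++ [p] := by simp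
      rw [h2, ih (by simp), PySem.Chars.join_cons_cons]
      simp
theorem pv_idx (m : Nat) :
    PySem.List.pyRange 0 (m : Int) 50 = (List.range ((m + 49) / 50)).map (fun k => ((50 * k : Nat) : Int)) := by
  rw [PySem.List.pyRange_of_pos 0 (m:Int) (by norm_num)]
  rcases Nat.eq_zero_or_pos m with hm | hm
  · subst hm; simp
  · have hlt : (0:Int) < m := by exact_mod_cast hm
    rw [if_pos hlt]
    have : ((m:Int) - 0 + 50 - 1) / 50 = ((m + 49 : Nat) : Int) / ((50:Nat):Int) := by push_cast; ring_nf
    rw [this, ← Int.natCast_div, Int.toNat_natCast]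
    apply List.map_congr_left
    intro k _; push_cast; ring

def pvJ (cs : List Char) : List Char :=
  PySem.Chars.join ['\n'] ((PySem.List.pyRange 0 (PySem.List.len cs) 50).map
    (fun i => PySem.List.slice cs (some i) (some (i + 50))))

def pvSep (m : Nat) : List Char := if 0 < m ∧ m % 50 = 0 then ['\n'] else []

theorem pvJ_eq (cs : List Char) :
    pvJ cs = PySem.Chars.join ['\n'] ((List.range ((cs.length + 49) / 50)).map
      (fun k => ((cs.drop (50 * k)).take 50))) := by
  unfold pvJ
  have hlen : PySem.List.len cs = ((cs.length : Nat) : Int) := by simp [PySem.List.len_eq]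
  rw [hlen, pv_idx, List.map_map]
  congr 1
  apply List.map_congr_left
  intro k _
  show PySem.List.slice cs (some ((50 * k : Nat) : Int)) (some (((50 * k : Nat) : Int) + 50)) = _
  rw [show (((50 * k : Nat) : Int) + 50) = (((50 * k : Nat) : Int) + ((50 : Nat) : Int)) by norm_num,
    PySem.List.slice_natCast_add]

theorem pvJ_snoc (cs : List Char) (c : Char) :
    pvJ (cs ++ [c]) = pvJ cs ++ pvSep cs.length ++ [c] := by
  rw [pvJ_eq, pvJ_eq]
  obtain ⟨m, hm⟩ : ∃ m, cs.length = m := ⟨_, rfl⟩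
  rw [hm]
  rw [show (cs ++ [c]).length = m + 1 by simp [hm]]
  by_cases hr : m % 50 = 0
  · -- a new chunk [c] is appended
    rw [show (m + 1 + 49) / 50 = (m + 49) / 50 + 1 by omega, List.range_succ, List.map_append]
    have hq : 50 * ((m + 49) / 50) = m := by omega
    have hfirst : (List.range ((m + 49) / 50)).map (fun k => (((cs ++ [c]).drop (50 * k)).take 50))
        = (List.range ((m + 49) / 50)).map (fun k => ((cs.drop (50 * k)).take 50)) := by
      apply List.map_congr_left
      intro k hk
      rw [List.mem_range] at hk
      have hkk : 50 * k + 50 ≤ m := by omega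
      rw [List.drop_append, List.take_append]
      have h1 : (cs.drop (50 * k)).length = m - 50 * k := by simp [hm]
      rw [h1, show (50 * k - cs.length) = 0 by omega, show 50 - (m - 50 * k) = 0 by omega]
      simp
    have hlast : ((cs ++ [c]).drop (50 * ((m + 49) / 50))).take 50 = [c] := by
      rw [hq, ← hm, List.drop_append, List.drop_length]
      simp
    rw [hfirst, List.map_singleton, hlast]
    rcases Nat.eq_zero_or_pos m with h0 | h0
    · rw [h0]; simp [PySem.Chars.join_singleton, pvSep]
    · have hne : (List.range ((m + 49) / 50)).map (fun k => ((cs.drop (50 * k)).take 50)) ≠ [] := by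
        simp [List.range_eq_nil]; omega
      rw [pv_join_snoc _ _ _ hne]
      simp [pvSep, h0, hr]
  · -- the last chunk is extended by c
    have h0 : 0 < m := by omega
    rw [show (m + 1 + 49) / 50 = (m + 49) / 50 by omega]
    have hq1 : (m + 49) / 50 = m / 50 + 1 := by omega
    rw [hq1, List.range_succ, List.map_append, List.map_append,
      List.map_singleton, List.map_singleton]
    have hfirst : (List.range (m / 50)).map (fun k => (((cs ++ [c]).drop (50 * k)).take 50))
        = (List.range (m / 50)).map (fun k => ((cs.drop (50 * k)).take 50)) := by
      apply List.map_congr_left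
      intro k hk
      rw [List.mem_range] at hk
      have hkk : 50 * k + 50 ≤ m := by omega
      rw [List.drop_append, List.take_append]
      have h1 : (cs.drop (50 * k)).length = m - 50 * k := by simp [hm]
      rw [h1, show (50 * k - cs.length) = 0 by omega, show 50 - (m - 50 * k) = 0 by omega]
      simp
    have hlen2 : (cs.drop (50 * (m / 50))).length = m % 50 := by simp [hm]; omega
    have hlast : ((cs ++ [c]).drop (50 * (m / 50))).take 50
        = (cs.drop (50 * (m / 50))).take 50 ++ [c] := by
      rw [List.drop_append, List.take_append]
      rw [show (50 * (m / 50) - cs.length) = 0 by omega, hlen2]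
      rw [List.drop_zero, show (50 - m % 50) = (50 - m % 50 - 1) + 1 by omega]
      simp
    rw [hfirst, hlast]
    rcases Nat.eq_zero_or_pos (m / 50) with hq0 | hq0
    · rw [hq0]
      simp [PySem.Chars.join_singleton, pvSep, hr]
    · have hne : (List.range (m / 50)).map (fun k => ((cs.drop (50 * k)).take 50)) ≠ [] := by
        simp [List.range_eq_nil]; omega
      rw [pv_join_snoc _ _ _ hne, pv_join_snoc _ _ _ hne]
      simp [pvSep, hr]

theorem pvJ_nil : pvJ [] = [] := by
  unfold pvJ
  rw [show PySem.List.len ([] : List Char) = ((0 : Nat) : Int) by simp [PySem.List.len_eq], pv_idx]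
  simp

theorem pv_main (g : Nat → Char) (n : Nat) :
    pvJ ((List.range n).map g) = (List.range n).flatMap (fun k => pvSep k ++ [g k]) := by
  induction n with
  | zero => simp [pvJ_nil]
  | succ n ih =>
    rw [List.range_succ, List.map_append, List.map_singleton, pvJ_snoc, ih,
      List.flatMap_append]
    simp

theorem pv_flatMap_singleton {α β : Type} (l : List α) (f : α → β) :
    l.flatMap (fun x => [f x]) = l.map f := by
  induction l with
  | nil => rfl
  | cons x t ih => simp [List.flatMap_cons, ih]


theorem pv_sep_cast (k : Nat) :
    (if 0 < ((k : Nat) : Int) ∧ PySem.Int.mod ((k : Nat) : Int) 50 = 0 then ['\n'] else ([] : List Char)) = pvSep k := by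
  have hmod : PySem.Int.mod ((k : Nat) : Int) 50 = ((k : Nat) : Int) % 50 :=
    PySem.Int.mod_eq_emod_of_pos (by norm_num)
  unfold pvSep
  rw [hmod]
  by_cases h : 0 < k ∧ k % 50 = 0
  · rw [if_pos (by omega : 0 < ((k : Nat) : Int) ∧ ((k : Nat) : Int) % 50 = 0), if_pos h]
  · rw [if_neg (by omega : ¬(0 < ((k : Nat) : Int) ∧ ((k : Nat) : Int) % 50 = 0)), if_neg h]

theorem ports_agree (uploaded_blocks : List Int) (block_count : Int) :
    render_block_status uploaded_blocks block_count = render_block_status_alt uploaded_blocks block_count := by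
  unfold render_block_status render_block_status_alt
  dsimp only
  rw [PySem.List.foldl_append_eq_flatMap, PySem.List.foldl_append_eq_flatMap,
    PySem.List.pyRange_one]
  simp only [List.nil_append, List.flatMap_map, Int.sub_zero, zero_add]
  simp only [← apply_ite (fun ch : Char => [ch])]
  rw [pv_flatMap_singleton]
  simp only [pv_sep_cast]
  exact congrArg String.ofList (pv_main _ _)

-- ===== VERDICT (by name: the statement is the Claim_ definition above) =====
theorem render_block_status_spec : Claim_equal_render_block_status := by
  intro uploaded_blocks block_count _
  unfold Spec_render_block_status
  exact ports_agree uploaded_blocks block_count
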